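-- pv_equiv track=rewrite | github.com/gabrielpc4/clone-hero-drum-and-levels-chartgen | src/songsterr_parsing/songsterr_import/writer.py | _iter_musical_eighth_runs
-- ===== SOURCE A (Python) =====
-- def _gap_is_steady_musical_eighth(gap: int, eighth_duration_ticks: int) -> bool:
--     """Colcheia estável entre dois hits: intervalo de ~1/2 semínima (não 32a nem pausa de colcheia)."""
--     e = max(1, int(eighth_duration_ticks))
--     gap_int = int(gap)
--     low = max(1, int(0.72 * e))
--     high = int(1.32 * e) + 1
--     return low <= gap_int <= high
--
-- def _iter_musical_eighth_runs(
--     cymbals_sorted: list[tuple[int, int]], eighth_duration_ticks: int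
-- ) -> list[tuple[int, int]]:
--     """
--     Cortes (start_idx, end_idx) inclusivos, comprimento >= 2, onde pares consecutivos
--     formam cadeia de 1/8. Outros intervalos = quebra (virada, pausa, acorde no mesmo tick).
--     """
--     n = len(cymbals_sorted)
--     if n < 2:
--         return []
--     e = max(1, int(eighth_duration_ticks))
--     runs: list[tuple[int, int]] = []
--     start = 0
--     while start < n:
--         end = start
--         while end + 1 < n and _gap_is_steady_musical_eighth(
--             cymbals_sorted[end + 1][0] - cymbals_sorted[end][0], e
--         ):
--             end += 1
--         if end > start:
--             runs.append((start, end))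
--         start = end + 1
--     return runs
-- ===== SOURCE B (Python) =====
-- def _gap_is_steady_musical_eighth(gap: int, eighth_duration_ticks: int) -> bool:
--     e = max(1, int(eighth_duration_ticks))
--     gap_int = int(gap)
--     low = max(1, int(0.72 * e))
--     high = int(1.32 * e) + 1
--     return low <= gap_int <= high
--
--
-- def _iter_musical_eighth_runs(cymbals_sorted, eighth_duration_ticks):
--     # Classify every consecutive gap once, then group maximal stretches of steady links.
--     e = max(1, int(eighth_duration_ticks))
--     links = [
--         _gap_is_steady_musical_eighth(b[0] - a[0], e)
--         for a, b in zip(cymbals_sorted, cymbals_sorted[1:])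
--     ]
--     runs = []
--     run_start = None
--     k = 0
--     for ok in links:
--         if ok and run_start is None:
--             run_start = k
--         elif (not ok) and run_start is not None:
--             runs.append((run_start, k))
--             run_start = None
--         k += 1
--     if run_start is not None:
--         runs.append((run_start, k))
--     return runs
-- ===== Notes on version B (the rewrite author's own statement) =====
-- stated objective: alternative
-- what changed: Replaces A's nested while loops (inner scan re-advancing an end index, outer loop jumping past each run) by a classify-then-group pass: one comprehension labels every consecutive gap as a steady-eighth link, then a single linear sweep groups maximal stretches of True links into (start, end) pairs.
import Mathlib
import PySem

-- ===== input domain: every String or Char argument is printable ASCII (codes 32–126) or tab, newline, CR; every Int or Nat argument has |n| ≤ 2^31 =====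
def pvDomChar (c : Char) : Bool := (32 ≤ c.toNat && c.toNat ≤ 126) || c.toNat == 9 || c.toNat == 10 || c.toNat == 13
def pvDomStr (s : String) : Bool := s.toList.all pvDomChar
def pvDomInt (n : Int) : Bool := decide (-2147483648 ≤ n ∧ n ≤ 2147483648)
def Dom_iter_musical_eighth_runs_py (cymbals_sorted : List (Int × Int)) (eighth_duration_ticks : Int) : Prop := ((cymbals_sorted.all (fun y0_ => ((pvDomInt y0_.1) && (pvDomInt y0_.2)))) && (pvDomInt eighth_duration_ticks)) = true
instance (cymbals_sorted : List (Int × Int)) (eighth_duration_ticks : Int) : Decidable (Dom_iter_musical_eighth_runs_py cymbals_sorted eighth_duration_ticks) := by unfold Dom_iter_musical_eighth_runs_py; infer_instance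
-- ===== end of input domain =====

-- B replaces A's nested while loops by a classify-then-group pass over a per-gap link list (same cost, different decomposition).


-- Shared helper (both Pythons contain the identical `_gap_is_steady_musical_eighth`):
-- `int(0.72 * e)` / `int(1.32 * e)`, exact IEEE-754 double emulation: the float literals are the
-- rationals 3242591731706757/2^52 and 5944751508129055/2^52; the product with the (exactly
-- representable) integer e is rounded to 53 significant bits, round-to-nearest ties-to-even,
-- then truncated.  Exact for the nonnegative products arising here.
def pvFloatMulFloor (num e : Int) : Int :=
  let p := num * e
  let L := PySem.Int.bitLength p
  if L ≤ 53 then p / 4503599627370496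
  else
    let s : Nat := L - 53
    let q := p / (2 ^ s : Int)
    let r := p % (2 ^ s : Int)
    let half := (2 ^ (s - 1) : Int)
    let q' := if half < r ∨ (r = half ∧ q % 2 = 1) then q + 1 else q
    (q' * 2 ^ s) / 4503599627370496

-- port of `_gap_is_steady_musical_eighth`
def pvGapSteady (gap eighth_duration_ticks : Int) : Bool :=
  let e := max 1 eighth_duration_ticks
  let gap_int := gap
  let low := max 1 (pvFloatMulFloor 3242591731706757 e)
  let high := pvFloatMulFloor 5944751508129055 e + 1
  decide (low ≤ gap_int ∧ gap_int ≤ high)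

-- ===== PORT A =====
-- `cymbals_sorted[i]` (index always in range where evaluated)
def pvGetPair (xs : List (Int × Int)) (i : Int) : Int × Int := (PySem.List.pyGet? xs i).getD (0, 0)

-- inner `while end + 1 < n and _gap_is_steady_musical_eighth(...)`: fuel only totalizes
def pvAInner (fuel : Nat) (xs : List (Int × Int)) (e endIdx : Int) : Int :=
  match fuel with
  | 0 => endIdx
  | fuel + 1 =>
    if endIdx + 1 < (xs.length : Int) ∧
        pvGapSteady ((pvGetPair xs (endIdx + 1)).1 - (pvGetPair xs endIdx).1) e = true then
      pvAInner fuel xs e (endIdx + 1)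
    else endIdx

-- outer `while start < n`: fuel only totalizes (start strictly increases each iteration)
def pvAOuter (fuel : Nat) (xs : List (Int × Int)) (e start : Int) (runs : List (Int × Int)) :
    List (Int × Int) :=
  match fuel with
  | 0 => runs
  | fuel + 1 =>
    if start < (xs.length : Int) then
      let endIdx := pvAInner xs.length xs e start
      let runs' := if start < endIdx then runs ++ [(start, endIdx)] else runs
      pvAOuter fuel xs e (endIdx + 1) runs'
    else runs

def iter_musical_eighth_runs_py (cymbals_sorted : List (Int × Int)) (eighth_duration_ticks : Int) :
    List (Int × Int) :=
  let n : Int := cymbals_sorted.length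
  if n < 2 then []
  else
    let e := max 1 eighth_duration_ticks
    pvAOuter cymbals_sorted.length cymbals_sorted e 0 []

-- ===== PORT B =====
-- `[_gap_is_steady_musical_eighth(b[0] - a[0], e) for a, b in zip(xs, xs[1:])]`
def pvLinks (xs : List (Int × Int)) (e : Int) : List Bool :=
  (xs.zip (xs.drop 1)).map (fun ab => pvGapSteady (ab.2.1 - ab.1.1) e)

-- the grouping `for ok in links` loop with its `run_start` / `k` state and trailing flush
def pvBLoop (ls : List Bool) (k : Int) (runStart : Option Int) (runs : List (Int × Int)) :
    List (Int × Int) :=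
  match ls with
  | [] =>
    match runStart with
    | none => runs
    | some s => runs ++ [(s, k)]
  | ok :: rest =>
    match runStart, ok with
    | none, true => pvBLoop rest (k + 1) (some k) runs
    | none, false => pvBLoop rest (k + 1) none runs
    | some s, true => pvBLoop rest (k + 1) (some s) runs
    | some s, false => pvBLoop rest (k + 1) none (runs ++ [(s, k)])

def iter_musical_eighth_runs_py_alt (cymbals_sorted : List (Int × Int))
    (eighth_duration_ticks : Int) : List (Int × Int) :=
  let e := max 1 eighth_duration_ticks
  pvBLoop (pvLinks cymbals_sorted e) 0 none []

-- ===== PRECONDITION & SPEC =====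
def Spec_iter_musical_eighth_runs_py (cymbals_sorted : List (Int × Int)) (eighth_duration_ticks : Int) (out : List (Int × Int)) : Prop := out = iter_musical_eighth_runs_py_alt cymbals_sorted eighth_duration_ticks
instance (cymbals_sorted : List (Int × Int)) (eighth_duration_ticks : Int) (out : List (Int × Int)) : Decidable (Spec_iter_musical_eighth_runs_py cymbals_sorted eighth_duration_ticks out) := by unfold Spec_iter_musical_eighth_runs_py; infer_instance

-- ===== CLAIM (what is proved, stated in full; the proofs are below) =====
def Claim_equal_iter_musical_eighth_runs_py : Prop := ∀ (cymbals_sorted : List (Int × Int)) (eighth_duration_ticks : Int), Dom_iter_musical_eighth_runs_py cymbals_sorted eighth_duration_ticks → Spec_iter_musical_eighth_runs_py cymbals_sorted eighth_duration_ticks (iter_musical_eighth_runs_py cymbals_sorted eighth_duration_ticks)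

-- ===== LEMMAS AND PROOFS =====

-- length of the leading all-true prefix of the link list
def pvLead : List Bool → Nat
  | [] => 0
  | false :: _ => 0
  | true :: r => pvLead r + 1

-- canonical run list of a link list starting at position i (both ports are reduced to this)
def pvRuns (ls : List Bool) (i : Int) : List (Int × Int) :=
  match ls with
  | [] => []
  | l :: r =>
    (if 0 < pvLead (l :: r) then [(i, i + (pvLead (l :: r) : Int))] else []) ++
      pvRuns ((l :: r).drop (pvLead (l :: r) + 1)) (i + (pvLead (l :: r) : Int) + 1)
termination_by ls.length
decreasing_by simp [List.length_drop]

theorem pvRuns_nil (i : Int) : pvRuns [] i = [] := by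
  rw [pvRuns.eq_def]

theorem pvRuns_cons (l : Bool) (r : List Bool) (i : Int) :
    pvRuns (l :: r) i =
      (if 0 < pvLead (l :: r) then [(i, i + (pvLead (l :: r) : Int))] else []) ++
        pvRuns ((l :: r).drop (pvLead (l :: r) + 1)) (i + (pvLead (l :: r) : Int) + 1) := by
  rw [pvRuns.eq_def]

theorem pvLinks_length (xs : List (Int × Int)) (e : Int) :
    (pvLinks xs e).length = xs.length - 1 := by
  simp [pvLinks]

theorem pvLead_drop (L : List Bool) (j : Nat) :
    pvLead (L.drop j) =
      if L[j]? = some true then pvLead (L.drop (j + 1)) + 1 else 0 := by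
  by_cases hj : j < L.length
  · rw [List.drop_eq_getElem_cons hj, List.getElem?_eq_getElem hj]
    cases L[j] <;> simp [pvLead]
  · rw [List.drop_eq_nil_of_le (by omega), List.getElem?_eq_none_iff.mpr (by omega)]
    simp [pvLead]

theorem pvAInner_eq (xs : List (Int × Int)) (e : Int) (fuel j : Nat)
    (hf : (pvLinks xs e).length - j ≤ fuel) :
    pvAInner fuel xs e (j : Int) = ((j + pvLead ((pvLinks xs e).drop j) : Nat) : Int) := by
  induction fuel generalizing j with
  | zero =>
    have hj : (pvLinks xs e).length ≤ j := by omega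
    rw [pvAInner, List.drop_eq_nil_of_le hj]
    simp [pvLead]
  | succ fuel ih =>
    have hlen := pvLinks_length xs e
    rw [pvAInner]
    by_cases hj : j < (pvLinks xs e).length
    · have hx1 : j + 1 < xs.length := by omega
      have hx0 : j < xs.length := by omega
      have hg1 : pvGetPair xs ((j : Int) + 1) = xs[j + 1] := by
        rw [pvGetPair, show ((j : Int) + 1) = ((j + 1 : Nat) : Int) from by push_cast; ring,
          PySem.List.pyGet?_natCast, List.getElem?_eq_getElem hx1]
        rfl
      have hg0 : pvGetPair xs (j : Int) = xs[j] := by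
        rw [pvGetPair, PySem.List.pyGet?_natCast, List.getElem?_eq_getElem hx0]
        rfl
      have hcond1 : (j : Int) + 1 < (xs.length : Int) := by exact_mod_cast hx1
      rw [hg1, hg0]
      have hLj : (pvLinks xs e)[j]'hj = pvGapSteady ((xs[j + 1]).1 - (xs[j]).1) e := by
        simp [pvLinks]
      cases hT : pvGapSteady ((xs[j + 1]).1 - (xs[j]).1) e with
      | true =>
        rw [if_pos ⟨hcond1, rfl⟩]
        rw [show ((j : Int) + 1) = ((j + 1 : Nat) : Int) from by push_cast; ring,
          ih (j + 1) (by omega)]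
        rw [pvLead_drop (pvLinks xs e) j,
          if_pos (by rw [List.getElem?_eq_getElem hj, hLj, hT])]
        push_cast; ring
      | false =>
        rw [if_neg (by simp)]
        rw [pvLead_drop (pvLinks xs e) j,
          if_neg (by rw [List.getElem?_eq_getElem hj, hLj, hT]; simp)]
        simp
    · have hxn : ¬ ((j : Int) + 1 < (xs.length : Int)) := by
        have hle : xs.length ≤ j + 1 := by omega
        exact not_lt.mpr (by exact_mod_cast hle)
      rw [if_neg (by rintro ⟨hc, -⟩; exact hxn hc)]
      rw [List.drop_eq_nil_of_le (by omega)]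
      simp [pvLead]

theorem pvAOuter_eq (xs : List (Int × Int)) (e : Int) (fuel s : Nat)
    (runs : List (Int × Int)) (hf : xs.length - s ≤ fuel) :
    pvAOuter fuel xs e (s : Int) runs = runs ++ pvRuns ((pvLinks xs e).drop s) (s : Int) := by
  induction fuel generalizing s runs with
  | zero =>
    have hs : xs.length ≤ s := by omega
    have hL : (pvLinks xs e).length ≤ s := by rw [pvLinks_length]; omega
    rw [pvAOuter, List.drop_eq_nil_of_le hL, pvRuns_nil]
    simp
  | succ fuel ih =>
    have hlen := pvLinks_length xs e
    rw [pvAOuter]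
    by_cases hs : s < xs.length
    · rw [if_pos (by exact_mod_cast hs)]
      set t := pvLead ((pvLinks xs e).drop s) with ht
      have hin : pvAInner xs.length xs e (s : Int) = ((s + t : Nat) : Int) :=
        pvAInner_eq xs e xs.length s (by omega)
      simp only [hin]
      rw [show ((s + t : Nat) : Int) + 1 = ((s + t + 1 : Nat) : Int) from by push_cast; ring,
        ih (s + t + 1) _ (by omega)]
      have hdd : ((pvLinks xs e).drop s).drop (t + 1) = (pvLinks xs e).drop (s + t + 1) := by
        rw [List.drop_drop]; congr 1
      cases hD : (pvLinks xs e).drop s with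
      | nil =>
        have ht0 : t = 0 := by rw [ht, hD]; rfl
        have hL0 : (pvLinks xs e).length ≤ s := List.drop_eq_nil_iff.mp hD
        have hnil2 : (pvLinks xs e).drop (s + t + 1) = [] :=
          List.drop_eq_nil_of_le (by omega)
        rw [hnil2, pvRuns_nil, pvRuns_nil]
        rw [if_neg (by rw [ht0]; push_cast; omega)]
      | cons l r =>
        have hlr : pvLead (l :: r) = t := by rw [ht, hD]
        have hR : pvRuns (l :: r) (s : Int) =
            (if 0 < t then [((s : Int), (s : Int) + (t : Int))] else []) ++
              pvRuns ((pvLinks xs e).drop (s + t + 1)) ((s : Int) + (t : Int) + 1) := by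
          rw [pvRuns_cons, hlr, ← hD, hdd]
        rw [hR]
        by_cases h0 : 0 < t
        · rw [if_pos h0, if_pos (by push_cast; omega)]
          rw [show ((s + t : Nat) : Int) = (s : Int) + (t : Int) from by push_cast; ring,
            show ((s + t + 1 : Nat) : Int) = (s : Int) + (t : Int) + 1 from by push_cast; ring]
          simp
        · have ht0 : t = 0 := by omega
          rw [if_neg h0, if_neg (by rw [ht0]; push_cast; omega)]
          rw [show ((s + t + 1 : Nat) : Int) = (s : Int) + (t : Int) + 1 from by push_cast; ring]
          simp
    · rw [if_neg (not_lt.mpr (by exact_mod_cast Nat.le_of_not_lt hs))]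
      have hL : (pvLinks xs e).length ≤ s := by omega
      rw [List.drop_eq_nil_of_le hL, pvRuns_nil]
      simp

theorem pvBLoop_eq (ls : List Bool) :
    (∀ (k : Int) (runs : List (Int × Int)),
        pvBLoop ls k none runs = runs ++ pvRuns ls k) ∧
    (∀ (k s : Int) (runs : List (Int × Int)),
        pvBLoop ls k (some s) runs =
          runs ++ (s, k + (pvLead ls : Int)) ::
            pvRuns (ls.drop (pvLead ls + 1)) (k + (pvLead ls : Int) + 1)) := by
  induction ls with
  | nil =>
    constructor
    · intro k runs; rw [pvBLoop, pvRuns_nil]; simp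
    · intro k s runs; rw [pvBLoop]; simp [pvLead, pvRuns_nil]
  | cons ok r ih =>
    obtain ⟨ihn, ihs⟩ := ih
    constructor
    · intro k runs
      cases ok with
      | true =>
        rw [pvBLoop, ihs, pvRuns_cons]
        rw [show pvLead (true :: r) = pvLead r + 1 from rfl, if_pos (by omega)]
        rw [show (true :: r).drop (pvLead r + 1 + 1) = r.drop (pvLead r + 1) from rfl]
        rw [show k + 1 + (pvLead r : Int) = k + ((pvLead r + 1 : Nat) : Int) from by
          push_cast; ring]
        simp
      | false =>
        rw [pvBLoop, ihn, pvRuns_cons]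
        rw [show pvLead (false :: r) = 0 from rfl, if_neg (by omega)]
        simp
    · intro k s runs
      cases ok with
      | true =>
        rw [pvBLoop, ihs]
        rw [show pvLead (true :: r) = pvLead r + 1 from rfl]
        rw [show (true :: r).drop (pvLead r + 1 + 1) = r.drop (pvLead r + 1) from rfl]
        rw [show k + 1 + (pvLead r : Int) = k + ((pvLead r + 1 : Nat) : Int) from by
          push_cast; ring]
      | false =>
        rw [pvBLoop, ihn]
        rw [show pvLead (false :: r) = 0 from rfl]
        rw [show (false :: r).drop (0 + 1) = r from rfl]
        simp

-- ===== VERDICT (by name: the statement is the Claim_ definition above) =====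
theorem iter_musical_eighth_runs_py_spec : Claim_equal_iter_musical_eighth_runs_py := by
  intro xs t _
  unfold Spec_iter_musical_eighth_runs_py
  show iter_musical_eighth_runs_py xs t = iter_musical_eighth_runs_py_alt xs t
  have hgoal :
      (if (xs.length : Int) < 2 then ([] : List (Int × Int))
        else pvAOuter xs.length xs (max 1 t) 0 []) =
        pvBLoop (pvLinks xs (max 1 t)) 0 none [] → 
      iter_musical_eighth_runs_py xs t = iter_musical_eighth_runs_py_alt xs t := fun h => h
  apply hgoal
  rw [(pvBLoop_eq (pvLinks xs (max 1 t))).1]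
  by_cases h2 : (xs.length : Int) < 2
  · have hL : pvLinks xs (max 1 t) = [] := by
      apply List.eq_nil_of_length_eq_zero
      rw [pvLinks_length]
      have : xs.length < 2 := by exact_mod_cast h2
      omega
    rw [if_pos h2, hL, pvRuns_nil]
    simp
  · rw [if_neg h2]
    have h := pvAOuter_eq xs (max 1 t) xs.length 0 [] (by omega)
    simpa using h
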